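-- pv_equiv track=rewrite | github.com/stsaxe/Master-Thesis-Stefan-Richard-Saxer | data_processing/preprocessing_functions.py | create_pkt_gen_jobs
-- ===== SOURCE A (Python) =====
-- def create_pkt_gen_jobs(config: dict[str, int], job_size: int = 100) -> list[tuple[str, int]]:
--     jobs = list()
--
--     for config_path, size in config.items():
--         remaining = size
--
--         while remaining > 0:
--             size = min(remaining, job_size)
--             remaining -= size
--             jobs.append((config_path, size))
--
--     return jobs
-- ===== SOURCE B (Python) =====
-- def create_pkt_gen_jobs(config: dict[str, int], job_size: int = 100) -> list[tuple[str, int]]: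
--     jobs = []
--     for config_path, size in config.items():
--         if size > 0:
--             full, rem = divmod(size, job_size)
--             jobs.extend([(config_path, job_size)] * full)
--             if rem:
--                 jobs.append((config_path, rem))
--     return jobs
-- ===== Notes on version B (the rewrite author's own statement) =====
-- stated objective: simpler
-- what changed: Replaces the hand-rolled repeated-subtraction while loop with a closed-form divmod per entry: full chunks by list repetition plus one remainder chunk, producing the identical list.
-- outside the precondition, e.g. on create_pkt_gen_jobs({'c': 5}, 0): A does not finish within the time limit, B raises ZeroDivisionError
import Mathlib
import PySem

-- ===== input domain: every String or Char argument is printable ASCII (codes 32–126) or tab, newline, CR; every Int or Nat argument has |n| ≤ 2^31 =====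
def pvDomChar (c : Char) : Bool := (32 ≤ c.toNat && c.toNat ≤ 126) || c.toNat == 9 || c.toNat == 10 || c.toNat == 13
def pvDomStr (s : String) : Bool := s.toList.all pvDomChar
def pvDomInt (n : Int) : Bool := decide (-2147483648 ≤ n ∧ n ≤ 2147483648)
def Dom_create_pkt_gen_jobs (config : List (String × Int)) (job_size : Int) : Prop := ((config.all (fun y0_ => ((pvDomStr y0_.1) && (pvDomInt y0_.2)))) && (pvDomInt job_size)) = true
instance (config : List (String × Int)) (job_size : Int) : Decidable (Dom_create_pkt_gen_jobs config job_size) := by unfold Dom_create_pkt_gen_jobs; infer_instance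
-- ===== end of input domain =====

-- B replaces A's repeated-subtraction while loop with a closed-form divmod per config
-- entry (full chunks by list repetition plus one remainder chunk); objective: simpler.
-- Pre_ excludes job_size ≤ 0 whenever some size is positive: there A's while loop never terminates.


-- ===== PORT A =====
-- A's while loop; fuel = remaining.toNat suffices whenever job_size ≥ 1 (each pass removes ≥ 1).
def pktLoopA (config_path : String) (job_size : Int) : Nat → Int → List (String × Int) → List (String × Int)
  | 0, _, jobs => jobs
  | n + 1, remaining, jobs =>
    if remaining > 0 then
      let size := min remaining job_size
      pktLoopA config_path job_size n (remaining - size) (jobs ++ [(config_path, size)])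
    else jobs

def create_pkt_gen_jobs (config : List (String × Int)) (job_size : Int) : List (String × Int) :=
  config.foldl (fun jobs p => pktLoopA p.1 job_size p.2.toNat p.2 jobs) []

-- ===== PORT B =====
def create_pkt_gen_jobs_alt (config : List (String × Int)) (job_size : Int) : List (String × Int) :=
  config.foldl (fun jobs p =>
    if p.2 > 0 then
      let full := PySem.Int.floordiv p.2 job_size
      let rem := PySem.Int.mod p.2 job_size
      jobs ++ List.replicate full.toNat (p.1, job_size) ++ (if rem ≠ 0 then [(p.1, rem)] else [])
    else jobs) []

-- ===== PRECONDITION & SPEC =====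
-- Pre_ excludes exactly the inputs on which A's while loop never terminates
-- (job_size ≤ 0 while some config size is positive); A returns on everything else.
def Pre_create_pkt_gen_jobs (config : List (String × Int)) (job_size : Int) : Prop :=
  0 < job_size ∨ ∀ p ∈ config, p.2 ≤ 0
instance (config : List (String × Int)) (job_size : Int) : Decidable (Pre_create_pkt_gen_jobs config job_size) := by unfold Pre_create_pkt_gen_jobs; infer_instance

def pvWitness_create_pkt_gen_jobs : (List (String × Int)) × Int := ([("a.cfg", 250), ("b.cfg", 100), ("c.cfg", -3)], 100)

def Spec_create_pkt_gen_jobs (config : List (String × Int)) (job_size : Int) (out : List (String × Int)) : Prop := out = create_pkt_gen_jobs_alt config job_size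
instance (config : List (String × Int)) (job_size : Int) (out : List (String × Int)) : Decidable (Spec_create_pkt_gen_jobs config job_size out) := by unfold Spec_create_pkt_gen_jobs; infer_instance

-- ===== CLAIM (what is proved, stated in full; the proofs are below) =====
def Claim_equal_create_pkt_gen_jobs : Prop := ∀ (config : List (String × Int)) (job_size : Int), Dom_create_pkt_gen_jobs config job_size → Pre_create_pkt_gen_jobs config job_size → Spec_create_pkt_gen_jobs config job_size (create_pkt_gen_jobs config job_size)

-- ===== LEMMAS AND PROOFS =====

-- the chunk list B emits for one positive size
def pktChunks (path : String) (job_size s : Int) : List (String × Int) :=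
  List.replicate (PySem.Int.floordiv s job_size).toNat (path, job_size) ++
    (if PySem.Int.mod s job_size ≠ 0 then [(path, PySem.Int.mod s job_size)] else [])

theorem pktLoopA_eq (path : String) (js : Int) (hjs : 0 < js) :
    ∀ (n : Nat) (s : Int), 0 < s → s.toNat ≤ n → ∀ jobs,
      pktLoopA path js n s jobs = jobs ++ pktChunks path js s := by
  intro n
  induction n with
  | zero => intro s hs hn; omega
  | succ n ih =>
    intro s hs hn jobs
    rw [pktLoopA]
    simp only [hs, if_pos]
    by_cases h : s ≤ js
    · -- last chunk: min s js = s, remaining becomes 0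
      have hmin : min s js = s := min_eq_left h
      rw [hmin]
      have h0 : s - s = 0 := by omega
      rw [h0]
      have hstop : ∀ m, pktLoopA path js m 0 (jobs ++ [(path, s)]) = jobs ++ [(path, s)] := by
        intro m; cases m <;> simp [pktLoopA]
      rw [hstop]
      -- pktChunks path js s = [(path, s)] when 0 < s ≤ js
      unfold pktChunks
      rcases eq_or_lt_of_le h with heq | hlt
      · subst heq
        have hfd : PySem.Int.floordiv s s = 1 := by
          rw [PySem.Int.floordiv_eq_ediv_of_pos hjs, Int.ediv_self (by omega)]
        have hmd : PySem.Int.mod s s = 0 := by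
          rw [PySem.Int.mod_eq_emod_of_pos hjs, Int.emod_self]
        simp [hfd, hmd]
      · have hfd : PySem.Int.floordiv s js = 0 := by
          rw [PySem.Int.floordiv_eq_ediv_of_pos hjs]
          exact Int.ediv_eq_zero_of_lt (by omega) hlt
        have hmd : PySem.Int.mod s js = s := by
          rw [PySem.Int.mod_eq_emod_of_pos hjs]
          exact Int.emod_eq_of_lt (by omega) hlt
        simp [hfd, hmd]; omega
    · -- full chunk: min s js = js, recurse on s - js
      rw [not_le] at h
      have hmin : min s js = js := min_eq_right (le_of_lt h)
      rw [hmin]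
      rw [ih (s - js) (by omega) (by omega)]
      -- pktChunks path js s = (path, js) :: pktChunks path js (s - js)
      unfold pktChunks
      have hfd : PySem.Int.floordiv s js = PySem.Int.floordiv (s - js) js + 1 := by
        rw [PySem.Int.floordiv_eq_ediv_of_pos hjs, PySem.Int.floordiv_eq_ediv_of_pos hjs]
        have h1 := Int.add_mul_ediv_right (s - js) 1 (show js ≠ 0 by omega)
        have h2 : s - js + 1 * js = s := by ring
        rw [h2] at h1
        omega
      have hmd : PySem.Int.mod s js = PySem.Int.mod (s - js) js := by
        rw [PySem.Int.mod_eq_emod_of_pos hjs, PySem.Int.mod_eq_emod_of_pos hjs]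
        exact (Int.sub_emod_right s js).symm
      have hge : 0 ≤ PySem.Int.floordiv (s - js) js := by
        rw [PySem.Int.floordiv_eq_ediv_of_pos hjs]
        exact Int.ediv_nonneg (by omega) (by omega)
      have htn : (PySem.Int.floordiv s js).toNat = (PySem.Int.floordiv (s - js) js).toNat + 1 := by
        omega
      rw [htn, hmd, List.replicate_succ]
      simp

theorem pktLoopA_nonpos (path : String) (js s : Int) (hs : s ≤ 0) (jobs : List (String × Int)) :
    pktLoopA path js s.toNat s jobs = jobs := by
  have : s.toNat = 0 := by omega
  rw [this, pktLoopA]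

-- ===== VERDICT (by name: the statement is the Claim_ definition above) =====
theorem create_pkt_gen_jobs_spec : Claim_equal_create_pkt_gen_jobs := by
  intro config job_size _ hpre
  unfold Spec_create_pkt_gen_jobs create_pkt_gen_jobs create_pkt_gen_jobs_alt
  apply PySem.List.foldl_congr_mem
  intro jobs p hp
  by_cases hpos : p.2 > 0
  · rcases hpre with hjs | hall
    · rw [pktLoopA_eq p.1 job_size hjs p.2.toNat p.2 hpos (le_refl _)]
      simp [hpos, pktChunks]
    · exact absurd (hall p hp) (by omega)
  · rw [pktLoopA_nonpos p.1 job_size p.2 (by omega)]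
    simp [hpos]
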